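-- pv_equiv track=rewrite | github.com/JFAR/adventofcode | challenge8.py | checkSumOf
-- ===== SOURCE A (Python) =====
-- def checkSumOf(entry):
--   chunks = ''.join(entry.split('-')[:-1])
--   letters = {}
--   for character in chunks:
--     if character in list(letters):
--       letters[character] += 1
--     else:
--       letters[character] = 1
--   output = ''.join(sortedListOf(letters)[:5])
--   return output
--
-- def sortedListOf(letters):
--   output = []
--   for letter in list(letters):
--     output = insertLetterInto(output, letter, letters)
--   return output
--
-- def insertLetterInto(listOfLetters, letterToInsert, letters):
--   count = 0
--   for letter in listOfLetters:
--     if (letters[letter] < letters[letterToInsert] or ((letters[letter] == letters[letterToInsert]) and (letter > letterToInsert))):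
--       return list(''.join(listOfLetters[:count]) + letterToInsert + ''.join(listOfLetters[count:]))
--     count+=1
--   if count ==0:
--     return [letterToInsert]
--   else:
--     listOfLetters.append(letterToInsert)
--     return listOfLetters
-- ===== SOURCE B (Python) =====
-- def checkSumOf(entry):
--   chunks = ''.join(entry.split('-')[:-1])
--   counts = {}
--   for character in chunks:
--     counts[character] = counts.get(character, 0) + 1
--   return ''.join(sorted(counts, key=lambda c: (-counts[c], c))[:5])
-- ===== Notes on version B (the rewrite author's own statement) =====
-- stated objective: simpler
-- what changed: Replaces the hand-written ordered-insertion helpers (sortedListOf/insertLetterInto) and the per-character key-list membership scan with a one-pass dict count and a single key-based sort on (negated count, letter).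
import Mathlib
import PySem

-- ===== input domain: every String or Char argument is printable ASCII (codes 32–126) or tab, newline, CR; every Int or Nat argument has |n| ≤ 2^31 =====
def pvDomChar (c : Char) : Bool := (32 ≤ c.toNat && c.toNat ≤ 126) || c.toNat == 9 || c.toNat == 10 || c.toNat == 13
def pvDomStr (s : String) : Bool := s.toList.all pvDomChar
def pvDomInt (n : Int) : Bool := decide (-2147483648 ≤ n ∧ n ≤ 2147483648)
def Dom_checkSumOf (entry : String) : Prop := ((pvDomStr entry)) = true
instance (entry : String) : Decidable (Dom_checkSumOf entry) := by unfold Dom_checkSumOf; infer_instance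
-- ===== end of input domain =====

-- B replaces A's hand-written ordered-insertion helpers with one key-based sort
-- (key = (-count, letter)); return values are proved equal on all inputs.

-- ===== PORT A =====
def pvInsertLetterInto (listOfLetters : List Char) (letterToInsert : Char)
    (letters : PySem.Dict Char Int) : List Char :=
  match listOfLetters with
  | [] => [letterToInsert]
  | y :: ys =>
      if letters.getD y 0 < letters.getD letterToInsert 0 ∨
         (letters.getD y 0 = letters.getD letterToInsert 0 ∧ letterToInsert < y) then
        letterToInsert :: y :: ys
      else
        y :: pvInsertLetterInto ys letterToInsert letters

def pvSortedListOf (letters : PySem.Dict Char Int) : List Char :=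
  letters.keys.foldl (fun output letter => pvInsertLetterInto output letter letters) []

def checkSumOf (entry : String) : String :=
  let chunks := (PySem.Str.join "" (List.dropLast ((PySem.Str.split? entry "-").getD []))).toList
  let letters : PySem.Dict Char Int := chunks.foldl
    (fun d c => if d.contains c then d.insert c (d.getD c 0 + 1) else d.insert c 1)
    PySem.Dict.empty
  String.ofList ((pvSortedListOf letters).take 5)

-- ===== PORT B =====
def checkSumOf_alt (entry : String) : String :=
  let chunks := (PySem.Str.join "" (List.dropLast ((PySem.Str.split? entry "-").getD []))).toList
  let counts : PySem.Dict Char Int := chunks.foldl (fun d c => d.insert c (d.getD c 0 + 1)) PySem.Dict.empty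
  String.ofList ((PySem.List.sorted2 counts.keys (fun c => -(counts.getD c 0)) (fun c => c)).take 5)

-- ===== PRECONDITION & SPEC =====
def Spec_checkSumOf (entry : String) (out : String) : Prop := out = checkSumOf_alt entry
instance (entry : String) (out : String) : Decidable (Spec_checkSumOf entry out) := by unfold Spec_checkSumOf; infer_instance

-- ===== CLAIM (what is proved, stated in full; the proofs are below) =====
def Claim_equal_checkSumOf : Prop := ∀ (entry : String), Dom_checkSumOf entry → Spec_checkSumOf entry (checkSumOf entry)

-- ===== LEMMAS AND PROOFS =====

-- A's counting loop (membership test, then += 1 or = 1) builds the same dict as B's get-based loop.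
lemma pvCount_step (d : PySem.Dict Char Int) (c : Char) :
    (if d.contains c then d.insert c (d.getD c 0 + 1) else d.insert c 1)
      = d.insert c (d.getD c 0 + 1) := by
  by_cases h : d.contains c
  · simp [h]
  · have h0 : d.getD c 0 = 0 := PySem.Dict.getD_of_not_contains d 0 (by simpa using h)
    simp [h, h0]

lemma pvCount_eq (chunks : List Char) :
    chunks.foldl (fun d c => if d.contains c then d.insert c (d.getD c 0 + 1) else d.insert c 1)
      (PySem.Dict.empty : PySem.Dict Char Int)
    = chunks.foldl (fun d c => d.insert c (d.getD c 0 + 1)) PySem.Dict.empty := by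
  apply PySem.List.foldl_congr_mem
  intro d c _
  exact pvCount_step d c

-- A's ordered insertion comparison is exactly the before-predicate of B's key-based sort.
lemma pvLt_eq (d : PySem.Dict Char Int) (x y : Char) :
    (decide (-(d.getD x 0) < -(d.getD y 0)) ||
      (!decide (-(d.getD y 0) < -(d.getD x 0)) && decide (x < y)))
    = decide (d.getD y 0 < d.getD x 0 ∨ (d.getD y 0 = d.getD x 0 ∧ x < y)) := by
  rcases lt_trichotomy (d.getD y 0) (d.getD x 0) with h|h|h
  · simp [neg_lt_neg_iff, h]
  · rw [h]; simp
  · simp [neg_lt_neg_iff, h, h.asymm, h.ne']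

-- A's ordered insertion is insertBy with the key-(-count, letter) comparison B's sort uses.
lemma pvInsert_eq_insertBy (d : PySem.Dict Char Int) (x : Char) (lst : List Char) :
    pvInsertLetterInto lst x d
      = PySem.List.insertBy
          (fun a b => decide (-(d.getD a 0) < -(d.getD b 0)) ||
            (!decide (-(d.getD b 0) < -(d.getD a 0)) && decide (a < b))) x lst := by
  have hfun : (fun a b => decide (-(d.getD a 0) < -(d.getD b 0)) ||
        (!decide (-(d.getD b 0) < -(d.getD a 0)) && decide (a < b)))
      = fun a b => decide (d.getD b 0 < d.getD a 0 ∨ (d.getD b 0 = d.getD a 0 ∧ a < b)) := by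
    funext a b; exact pvLt_eq d a b
  rw [hfun]
  induction lst with
  | nil => rfl
  | cons y ys ih =>
      simp only [pvInsertLetterInto, PySem.List.insertBy]
      by_cases h : d.getD y 0 < d.getD x 0 ∨ (d.getD y 0 = d.getD x 0 ∧ x < y)
      · rw [if_pos h, if_pos (decide_eq_true h)]
      · rw [if_neg h, if_neg (by simp [h]), ih]

lemma pvSorted_eq (d : PySem.Dict Char Int) :
    pvSortedListOf d = PySem.List.sorted2 d.keys (fun c => -(d.getD c 0)) (fun c => c) := by
  unfold pvSortedListOf PySem.List.sorted2
  simp only [if_neg (by decide : ¬ (false = true))]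
  apply PySem.List.foldl_congr_mem
  intro acc x _
  exact pvInsert_eq_insertBy d x acc

-- ===== VERDICT (by name: the statement is the Claim_ definition above) =====
theorem checkSumOf_spec : Claim_equal_checkSumOf := by
  intro entry _
  simp only [Spec_checkSumOf, checkSumOf, checkSumOf_alt]
  rw [pvCount_eq, pvSorted_eq]
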